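-- pv_equiv track=rewrite | github.com/bareola/PyBites | 5/names.py | shortest_first_name
-- ===== SOURCE A (Python) =====
-- def dedup_and_title_case_names(names):
--     """Should return a list of title cased names,
--        each name appears only once"""
--     sortedNames = []
--     for name in names:
--         if name.title() not in sortedNames:
--             sortedNames.append(name.title())
--     return sortedNames
--
-- def shortest_first_name(names):
--     """Returns the shortest first name (str).
--        You can assume there is only one shortest name.
--     """
--     names = dedup_and_title_case_names(names)
--     shortestName = None
--     for name in names:
--         if shortestName == None:
--             shortestName = name.split()[0]
--         elif len(name.split()[0])<len(shortestName):
--             shortestName = name.split()[0]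
--     return shortestName
-- ===== SOURCE B (Python) =====
-- def shortest_first_name(names):
--     first_names = [name.title().split()[0] for name in names]
--     return min(first_names, key=len, default=None)
-- ===== Notes on version B (the rewrite author's own statement) =====
-- stated objective: faster
-- what changed: B drops A's quadratic membership-based dedup pass entirely (the first length-minimal first name is unchanged by removing later duplicates) and replaces the manual scan-with-accumulator by a single map to first names followed by min(key=len, default=None).
import Mathlib
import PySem

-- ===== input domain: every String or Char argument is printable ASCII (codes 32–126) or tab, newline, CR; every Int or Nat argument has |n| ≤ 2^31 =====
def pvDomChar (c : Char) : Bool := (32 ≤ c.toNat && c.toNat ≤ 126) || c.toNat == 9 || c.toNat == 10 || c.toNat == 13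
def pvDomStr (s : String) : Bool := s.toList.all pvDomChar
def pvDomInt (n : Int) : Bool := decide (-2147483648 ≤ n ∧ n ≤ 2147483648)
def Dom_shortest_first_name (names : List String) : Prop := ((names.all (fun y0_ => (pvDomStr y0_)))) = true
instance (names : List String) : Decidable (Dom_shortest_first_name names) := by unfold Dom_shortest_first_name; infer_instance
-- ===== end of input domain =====

-- B drops A's quadratic membership-dedup pass (removing later duplicates cannot change the first
-- length-minimal first name) and replaces the manual minimum scan by a single map to first names
-- followed by min(key=len) (objective: faster, measured).


-- shared helper: Python's str.title(), ported by hand (PySem has no title); exact on the ASCII domain,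
-- where 'cased character' coincides with PySem.Chars.isalpha
def titleChars : Bool → List Char → List Char
  | _, [] => []
  | prev, c :: rest =>
    if PySem.Chars.isalpha c then
      (if prev then PySem.Chars.lowerChar c else PySem.Chars.upperChar c) :: titleChars true rest
    else c :: titleChars false rest

def pyTitle (s : String) : String := String.ofList (titleChars false s.toList)

-- ===== PORT A =====
def dedup_and_title_case_names (names : List String) : List String :=
  names.foldl
    (fun sortedNames name =>
      if pyTitle name ∈ sortedNames then sortedNames else sortedNames ++ [pyTitle name])
    []

def shortest_first_name (names : List String) : Option String :=
  let names' := dedup_and_title_case_names names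
  names'.foldl
    (fun shortestName name =>
      match shortestName with
      | none => PySem.List.pyGet? (PySem.Str.split₀ name) 0   -- name.split()[0]; none = IndexError, excluded by Pre_
      | some s =>
        match PySem.List.pyGet? (PySem.Str.split₀ name) 0 with
        | some f => if f.length < s.length then some f else some s
        | none => some s)                                      -- IndexError in Python, excluded by Pre_
    none

-- ===== PORT B =====
def shortest_first_name_alt (names : List String) : Option String :=
  let first_names := names.map
    (fun name => (PySem.List.pyGet? (PySem.Str.split₀ (pyTitle name)) 0).getD "")  -- [0] raises outside Pre_; getD unreachable under Pre_
  PySem.List.min? first_names (fun f => f.length)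

-- ===== PRECONDITION & SPEC =====
-- Pre_ excludes exactly the inputs on which A raises IndexError: a name that is empty or all
-- whitespace makes name.split()[0] raise (in B too).
def Pre_shortest_first_name (names : List String) : Prop :=
  ∀ name ∈ names, name.toList.any (fun c => !PySem.Chars.isspace c) = true
instance (names : List String) : Decidable (Pre_shortest_first_name names) := by
  unfold Pre_shortest_first_name; infer_instance

def pvWitness_shortest_first_name : List String := ["anna banana", "Bob Stone", "ANNA BANANA"]

def Spec_shortest_first_name (names : List String) (out : Option String) : Prop := out = shortest_first_name_alt names
instance (names : List String) (out : Option String) : Decidable (Spec_shortest_first_name names out) := by unfold Spec_shortest_first_name; infer_instance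

-- ===== CLAIM (what is proved, stated in full; the proofs are below) =====
def Claim_equal_shortest_first_name : Prop := ∀ (names : List String), Dom_shortest_first_name names → Pre_shortest_first_name names → Spec_shortest_first_name names (shortest_first_name names)

-- ===== LEMMAS AND PROOFS =====

-- first name of an (already title-cased) string, total form; under Pre_ the pyGet? is a some
def gFirst (t : String) : String := (PySem.List.pyGet? (PySem.Str.split₀ t) 0).getD ""

-- min?'s fold step, specialised to first names of full names
def stepS (b : Option String) (t : String) : Option String :=
  match b with
  | none => some (gFirst t)
  | some m => if (gFirst t).length < m.length then some (gFirst t) else some m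

-- A's dedup step
def dstep (acc : List String) (t : String) : List String :=
  if t ∈ acc then acc else acc ++ [t]

theorem alpha_upper_not_space (c : Char) (h : PySem.Chars.isalpha c = true) :
    PySem.Chars.isspace (PySem.Chars.upperChar c) = false := by
  simp only [PySem.Chars.isalpha, Bool.or_eq_true, PySem.Chars.isupper, PySem.Chars.islower,
    Bool.and_eq_true, decide_eq_true_eq, Char.le_def] at h
  unfold PySem.Chars.upperChar
  split_ifs with hl
  · simp only [PySem.Chars.islower, Bool.and_eq_true, decide_eq_true_eq, Char.le_def] at hl
    have hval : (Char.ofNat (c.toNat - 32)).toNat = c.toNat - 32 := by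
      rw [Char.toNat_ofNat, if_pos]; unfold Nat.isValidChar; left
      have h1 : 97 ≤ c.toNat := hl.1
      have h2 : c.toNat ≤ 122 := hl.2
      omega
    simp only [PySem.Chars.isspace, hval, Bool.or_eq_false_iff, decide_eq_false_iff_not,
      Bool.and_eq_false_iff]
    have h1 : 97 ≤ c.toNat := hl.1
    have h2 : c.toNat ≤ 122 := hl.2
    omega
  · simp only [PySem.Chars.islower, Bool.and_eq_true, decide_eq_true_eq, Char.le_def] at hl
    have h2 : 65 ≤ c.toNat ∧ c.toNat ≤ 90 := by
      rcases h with ⟨h1, h2⟩ | ⟨h1, h2⟩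
      · exact ⟨h1, h2⟩
      · exact absurd ⟨h1, h2⟩ hl
    simp only [PySem.Chars.isspace, Bool.or_eq_false_iff, decide_eq_false_iff_not,
      Bool.and_eq_false_iff]
    omega

theorem alpha_lower_not_space (c : Char) (h : PySem.Chars.isalpha c = true) :
    PySem.Chars.isspace (PySem.Chars.lowerChar c) = false := by
  simp only [PySem.Chars.isalpha, Bool.or_eq_true, PySem.Chars.isupper, PySem.Chars.islower,
    Bool.and_eq_true, decide_eq_true_eq, Char.le_def] at h
  unfold PySem.Chars.lowerChar
  split_ifs with hu
  · simp only [PySem.Chars.isupper, Bool.and_eq_true, decide_eq_true_eq, Char.le_def] at hu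
    have hval : (Char.ofNat (c.toNat + 32)).toNat = c.toNat + 32 := by
      rw [Char.toNat_ofNat, if_pos]; unfold Nat.isValidChar; left
      have h1 : 65 ≤ c.toNat := hu.1
      have h2 : c.toNat ≤ 90 := hu.2
      omega
    simp only [PySem.Chars.isspace, hval, Bool.or_eq_false_iff, decide_eq_false_iff_not,
      Bool.and_eq_false_iff]
    have h1 : 65 ≤ c.toNat := hu.1
    have h2 : c.toNat ≤ 90 := hu.2
    omega
  · simp only [PySem.Chars.isupper, Bool.and_eq_true, decide_eq_true_eq, Char.le_def] at hu
    have h2 : 97 ≤ c.toNat ∧ c.toNat ≤ 122 := by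
      rcases h with ⟨h1, h2⟩ | ⟨h1, h2⟩
      · exact absurd ⟨h1, h2⟩ hu
      · exact ⟨h1, h2⟩
    simp only [PySem.Chars.isspace, Bool.or_eq_false_iff, decide_eq_false_iff_not,
      Bool.and_eq_false_iff]
    omega

theorem any_title (cs : List Char) (prev : Bool)
    (h : cs.any (fun c => !PySem.Chars.isspace c) = true) :
    (titleChars prev cs).any (fun c => !PySem.Chars.isspace c) = true := by
  induction cs generalizing prev with
  | nil => simp at h
  | cons c rest ih =>
    simp only [List.any_cons, Bool.or_eq_true, Bool.not_eq_eq_eq_not, Bool.not_true] at h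
    unfold titleChars
    by_cases ha : PySem.Chars.isalpha c = true
    · rw [if_pos ha]
      simp only [List.any_cons, Bool.or_eq_true]
      rcases h with h | h
      · left
        cases prev
        · simp [alpha_upper_not_space c ha]
        · simp [alpha_lower_not_space c ha]
      · right; exact ih true h
    · rw [if_neg ha]
      simp only [List.any_cons, Bool.or_eq_true]
      rcases h with h | h
      · left; simp [h]
      · right; exact ih false h

theorem split_go_acc_ne_nil (cs cur : List Char) (acc : List (List Char)) (h : acc ≠ []) :
    PySem.Chars.split₀.go cs cur acc ≠ [] := by
  induction cs generalizing cur acc with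
  | nil =>
    unfold PySem.Chars.split₀.go
    split_ifs <;> simp_all
  | cons c rest ih =>
    unfold PySem.Chars.split₀.go
    split_ifs with h1 h2
    · exact ih [] acc h
    · exact ih [] (cur.reverse :: acc) (by simp)
    · exact ih (c :: cur) acc h

theorem split_go_cur_ne_nil (cs cur : List Char) (acc : List (List Char)) (h : cur ≠ []) :
    PySem.Chars.split₀.go cs cur acc ≠ [] := by
  induction cs generalizing cur acc with
  | nil =>
    unfold PySem.Chars.split₀.go
    split_ifs with h1
    · simp [List.isEmpty_iff] at h1; exact absurd h1 h
    · simp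
  | cons c rest ih =>
    unfold PySem.Chars.split₀.go
    split_ifs with h1 h2
    · simp [List.isEmpty_iff] at h2; exact absurd h2 h
    · exact split_go_acc_ne_nil rest [] (cur.reverse :: acc) (by simp)
    · exact ih (c :: cur) acc (by simp)

theorem split₀_ne_nil (cs : List Char) (h : cs.any (fun c => !PySem.Chars.isspace c) = true) :
    PySem.Chars.split₀ cs ≠ [] := by
  unfold PySem.Chars.split₀
  -- generalized over cur/acc
  suffices hgen : ∀ (cs' : List Char), cs'.any (fun c => !PySem.Chars.isspace c) = true →
      ∀ cur acc, PySem.Chars.split₀.go cs' cur acc ≠ [] by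
    exact hgen cs h [] []
  intro cs' h'
  induction cs' with
  | nil => simp at h'
  | cons c rest ih =>
    intro cur acc
    simp only [List.any_cons, Bool.or_eq_true, Bool.not_eq_eq_eq_not, Bool.not_true] at h'
    unfold PySem.Chars.split₀.go
    split_ifs with h1 h2
    · rcases h' with h' | h'
      · rw [h'] at h1; simp at h1
      · exact ih (by simpa using h') [] acc
    · exact split_go_acc_ne_nil rest [] (cur.reverse :: acc) (by simp)
    · exact split_go_cur_ne_nil rest (c :: cur) acc (by simp)

theorem pre_some (t : String) (h : t.toList.any (fun c => !PySem.Chars.isspace c) = true) :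
    PySem.List.pyGet? (PySem.Str.split₀ (pyTitle t)) 0 = some (gFirst (pyTitle t)) := by
  have hany : (pyTitle t).toList.any (fun c => !PySem.Chars.isspace c) = true := by
    unfold pyTitle
    rw [String.toList_ofList]
    exact any_title _ _ h
  have hne : PySem.Str.split₀ (pyTitle t) ≠ [] := by
    unfold PySem.Str.split₀
    simp only [ne_eq, List.map_eq_nil_iff]
    exact split₀_ne_nil _ hany
  rcases hx : PySem.Str.split₀ (pyTitle t) with _ | ⟨x, r⟩
  · exact absurd hx hne
  · simp only [gFirst, hx]
    simp [PySem.List.pyGet?, PySem.List.pyIdx?]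

theorem mem_dedup_fold (ts : List String) (acc : List String) (x : String)
    (h : x ∈ ts.foldl dstep acc) : x ∈ acc ∨ x ∈ ts := by
  induction ts generalizing acc with
  | nil => simp at h; exact Or.inl h
  | cons t rest ih =>
    simp only [List.foldl_cons] at h
    rcases ih (dstep acc t) h with h' | h'
    · unfold dstep at h'
      split_ifs at h' with hm
      · exact Or.inl h'
      · simp only [List.mem_append, List.mem_singleton] at h'
        rcases h' with h' | h'
        · exact Or.inl h'
        · exact Or.inr (by simp [h'])
    · exact Or.inr (List.mem_cons_of_mem _ h')

theorem dedup_fold_prefix (ts : List String) (acc : List String) :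
    ∃ r, ts.foldl dstep acc = acc ++ r := by
  induction ts generalizing acc with
  | nil => exact ⟨[], by simp⟩
  | cons t rest ih =>
    simp only [List.foldl_cons]
    by_cases hm : t ∈ acc
    · rw [show dstep acc t = acc from by unfold dstep; rw [if_pos hm]]
      exact ih acc
    · rw [show dstep acc t = acc ++ [t] from by unfold dstep; rw [if_neg hm]]
      rcases ih (acc ++ [t]) with ⟨r, hr⟩
      exact ⟨t :: r, by simp [hr]⟩

theorem stepS_some (b : Option String) (t : String) :
    ∃ m, stepS b t = some m ∧ m.length ≤ (gFirst t).length ∧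
      (∀ s, b = some s → m.length ≤ s.length) := by
  cases b with
  | none => exact ⟨gFirst t, rfl, le_refl _, by intro s hs; cases hs⟩
  | some s =>
    simp only [stepS]
    split_ifs with hlt
    · exact ⟨gFirst t, rfl, le_refl _, by intro s' hs'; cases hs'; omega⟩
    · exact ⟨s, rfl, by omega, by intro s' hs'; cases hs'; omega⟩

theorem stepS_absorb (b : Option String) (t u : String) (h : stepS b u = b) :
    stepS (stepS b t) u = stepS b t := by
  cases b with
  | none => exact absurd h (by unfold stepS; simp)
  | some s =>
    have hle : s.length ≤ (gFirst u).length := by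
      simp only [stepS] at h
      split_ifs at h with hlt
      · have hgu : gFirst u = s := by injection h
        rw [hgu]
      · omega
    rcases stepS_some (some s) t with ⟨m, hm, _, hms⟩
    rw [hm]
    have hml : m.length ≤ s.length := hms s rfl
    simp only [stepS]
    rw [if_neg (by omega)]

theorem stepS_idem (b : Option String) (t : String) :
    stepS (stepS b t) t = stepS b t := by
  rcases stepS_some b t with ⟨m, hm, hmt, _⟩
  rw [hm]
  simp only [stepS]
  rw [if_neg (by omega)]

theorem dedup_min_inv (ts : List String) (seen : List String) (b : Option String)
    (h : ∀ t ∈ seen, stepS b t = b) :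
    List.foldl stepS b ((List.foldl dstep seen ts).drop seen.length) = List.foldl stepS b ts := by
  induction ts generalizing seen b with
  | nil => simp
  | cons t rest ih =>
    simp only [List.foldl_cons]
    by_cases hm : t ∈ seen
    · rw [show dstep seen t = seen by unfold dstep; rw [if_pos hm]]
      rw [h t hm] at *
      exact ih seen b h
    · rw [show dstep seen t = seen ++ [t] by unfold dstep; rw [if_neg hm]]
      rcases dedup_fold_prefix rest (seen ++ [t]) with ⟨r, hr⟩
      have hdrop : (List.foldl dstep (seen ++ [t]) rest).drop seen.length
          = t :: (List.foldl dstep (seen ++ [t]) rest).drop (seen ++ [t]).length := by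
        rw [hr]
        simp [List.drop_append]
      rw [hdrop]
      simp only [List.foldl_cons]
      have h' : ∀ u ∈ seen ++ [t], stepS (stepS b t) u = stepS b t := by
        intro u hu
        rcases List.mem_append.mp hu with hu | hu
        · exact stepS_absorb b t u (h u hu)
        · rw [List.mem_singleton.mp hu]
          exact stepS_idem b t
      exact ih (seen ++ [t]) (stepS b t) h'

-- ===== VERDICT (by name: the statement is the Claim_ definition above) =====
theorem shortest_first_name_spec : Claim_equal_shortest_first_name := by
  intro names _hdom hpre
  unfold Spec_shortest_first_name
  set ts := names.map pyTitle with hts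
  -- the per-element someness fact, for every title-cased name
  have hsome : ∀ t ∈ ts, PySem.List.pyGet? (PySem.Str.split₀ t) 0 = some (gFirst t) := by
    intro t ht
    rcases List.mem_map.mp ht with ⟨n, hn, rfl⟩
    exact pre_some n (hpre n hn)
  -- A's dedup list equals the dstep fold over ts
  have hded : dedup_and_title_case_names names = List.foldl dstep [] ts := by
    unfold dedup_and_title_case_names
    rw [hts, List.foldl_map]
    rfl
  -- A's main loop over the dedup list, rewritten with stepS
  have hA : shortest_first_name names = List.foldl stepS none (List.foldl dstep [] ts) := by
    unfold shortest_first_name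
    rw [hded]
    apply PySem.List.foldl_congr_mem
    intro acc x hx
    have hxts : x ∈ ts := by
      rcases mem_dedup_fold ts [] x hx with h | h
      · simp at h
      · exact h
    rw [hsome x hxts]
    unfold stepS
    cases acc <;> rfl
  -- B is the stepS fold over ts itself
  have hB : shortest_first_name_alt names = List.foldl stepS none ts := by
    rw [hts]
    show PySem.List.min?
        (names.map (fun name => (PySem.List.pyGet? (PySem.Str.split₀ (pyTitle name)) 0).getD ""))
        (fun f => f.length) = _
    unfold PySem.List.min?
    rw [List.foldl_map, List.foldl_map]
    apply PySem.List.foldl_congr_mem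
    intro acc x _
    cases acc <;> rfl
  rw [hA, hB]
  have := dedup_min_inv ts [] none (by intro t ht; simp at ht)
  simpa using this
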